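-- pv_equiv track=rewrite | github.com/kamo104/PiTSZ | algorytmy/151481.py | getTotalDelay
-- ===== SOURCE A (Python) =====
-- def calcLateness(currentTime, deadline):
--     return max(0, currentTime - deadline)
--
-- def getTotalDelay(sequence, jobs, transitions):
--     currentTime = 0
--     totalLateness = 0
--     for i, job in enumerate(sequence):
--         p_j, d_j = jobs[job]
--         if i > 0:
--             prevJob = sequence[i - 1]
--             currentTime += transitions[prevJob][job]
--         currentTime += p_j
--         totalLateness += calcLateness(currentTime, d_j)
--     return totalLateness
-- ===== SOURCE B (Python) =====
-- def getTotalDelay(sequence, jobs, transitions):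
--     if not sequence:
--         return 0
--     pairs = list(zip(sequence, sequence[1:]))
--     # total duration of the whole schedule, computed once
--     t = sum(jobs[j][0] for j in sequence)
--     t += sum(transitions[a][b] for a, b in pairs)
--     # walk the transition pairs backwards: t is the completion time of pair's second job
--     total = 0
--     for prev, j in reversed(pairs):
--         total += max(0, t - jobs[j][1])
--         t -= jobs[j][0] + transitions[prev][j]
--     return total + max(0, t - jobs[sequence[0]][1])
-- ===== Notes on version B (the rewrite author's own statement) =====
-- stated objective: alternative
-- what changed: Replaces A's forward accumulation of (currentTime, totalLateness) by a reverse walk: compute the schedule's total duration once, then traverse the transition pairs from last to first, recovering each completion time by subtraction and summing lateness back-to-front.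
import Mathlib
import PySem

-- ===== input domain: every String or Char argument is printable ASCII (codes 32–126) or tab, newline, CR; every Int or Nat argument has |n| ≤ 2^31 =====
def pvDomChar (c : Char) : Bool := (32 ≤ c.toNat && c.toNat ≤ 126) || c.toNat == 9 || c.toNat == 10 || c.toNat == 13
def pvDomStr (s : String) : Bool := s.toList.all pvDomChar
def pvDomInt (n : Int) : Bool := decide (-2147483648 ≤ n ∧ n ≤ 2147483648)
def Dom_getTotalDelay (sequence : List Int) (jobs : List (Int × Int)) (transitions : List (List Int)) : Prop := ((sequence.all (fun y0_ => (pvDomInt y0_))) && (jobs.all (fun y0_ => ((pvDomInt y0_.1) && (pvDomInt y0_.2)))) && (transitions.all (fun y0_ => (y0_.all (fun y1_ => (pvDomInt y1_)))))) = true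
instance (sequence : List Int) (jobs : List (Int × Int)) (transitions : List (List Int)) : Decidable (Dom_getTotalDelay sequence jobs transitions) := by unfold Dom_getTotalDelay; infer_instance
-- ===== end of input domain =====

-- B replaces A's forward accumulation by a reverse walk: total duration computed once, then the
-- transition pairs are traversed last-to-first, recovering completion times by subtraction
-- (alternative structure, same O(n) cost).

-- ===== PORT A =====
def calcLateness (currentTime deadline : Int) : Int := max 0 (currentTime - deadline)

def getTotalDelay (sequence : List Int) (jobs : List (Int × Int)) (transitions : List (List Int)) : Int :=
  ((PySem.List.enumerate sequence 0).foldl (fun (st : Int × Int) p =>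
      let pd := PySem.List.pyGetD jobs p.2 (0, 0)
      let ct1 := if p.1 > 0 then
          st.1 + PySem.List.pyGetD (PySem.List.pyGetD transitions (PySem.List.pyGetD sequence (p.1 - 1) 0) []) p.2 0
        else st.1
      let ct2 := ct1 + pd.1
      (ct2, st.2 + calcLateness ct2 pd.2)) ((0 : Int), (0 : Int))).2

-- ===== PORT B =====
-- helpers naming the composite lookups Source B writes inline: jobs[j][0], jobs[j][1], transitions[a][b]
def pvP (jobs : List (Int × Int)) (j : Int) : Int := (PySem.List.pyGetD jobs j (0, 0)).1
def pvDl (jobs : List (Int × Int)) (j : Int) : Int := (PySem.List.pyGetD jobs j (0, 0)).2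
def pvTr (transitions : List (List Int)) (a b : Int) : Int :=
  PySem.List.pyGetD (PySem.List.pyGetD transitions a []) b 0

def getTotalDelay_alt (sequence : List Int) (jobs : List (Int × Int)) (transitions : List (List Int)) : Int :=
  match sequence with
  | [] => 0
  | j0 :: rest =>
    let pairs := (j0 :: rest).zip rest
    let t0 : Int := ((j0 :: rest).map (fun j => pvP jobs j)).sum
        + (pairs.map (fun q => pvTr transitions q.1 q.2)).sum
    let st := pairs.reverse.foldl (fun (st : Int × Int) q =>
        (st.1 - (pvP jobs q.2 + pvTr transitions q.1 q.2),
         st.2 + max 0 (st.1 - pvDl jobs q.2))) (t0, (0 : Int))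
    st.2 + max 0 (st.1 - pvDl jobs j0)

-- ===== PRECONDITION & SPEC =====
-- Pre_ excludes exactly the inputs on which Python A raises IndexError (a job index or a
-- consecutive-pair transition index out of Python's (negative-inclusive) range).
def Pre_getTotalDelay (sequence : List Int) (jobs : List (Int × Int)) (transitions : List (List Int)) : Prop :=
  (∀ j ∈ sequence, PySem.Raise.InRange jobs.length j) ∧
  (∀ p ∈ sequence.zip sequence.tail, PySem.Raise.InRange transitions.length p.1 ∧
      PySem.Raise.InRange (PySem.List.pyGetD transitions p.1 []).length p.2)
instance (sequence : List Int) (jobs : List (Int × Int)) (transitions : List (List Int)) : Decidable (Pre_getTotalDelay sequence jobs transitions) := by unfold Pre_getTotalDelay; infer_instance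

def pvWitness_getTotalDelay : List Int × (List (Int × Int)) × List (List Int) :=
  ([0, 1], [(3, 2), (4, 10)], [[0, 5], [7, 0]])

def Spec_getTotalDelay (sequence : List Int) (jobs : List (Int × Int)) (transitions : List (List Int)) (out : Int) : Prop := out = getTotalDelay_alt sequence jobs transitions
instance (sequence : List Int) (jobs : List (Int × Int)) (transitions : List (List Int)) (out : Int) : Decidable (Spec_getTotalDelay sequence jobs transitions out) := by unfold Spec_getTotalDelay; infer_instance

-- ===== CLAIM (what is proved, stated in full; the proofs are below) =====
def Claim_equal_getTotalDelay : Prop := ∀ (sequence : List Int) (jobs : List (Int × Int)) (transitions : List (List Int)), Dom_getTotalDelay sequence jobs transitions → Pre_getTotalDelay sequence jobs transitions → Spec_getTotalDelay sequence jobs transitions (getTotalDelay sequence jobs transitions)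

-- ===== LEMMAS AND PROOFS =====

-- recursive description of A's job-by-job accumulation
def pvLoop (jobs : List (Int × Int)) (transitions : List (List Int)) : Int → List Int → Int → Int → Int
  | _, [], _, tl => tl
  | prev, j :: rest, ct, tl =>
    let ct' := ct + pvTr transitions prev j + pvP jobs j
    pvLoop jobs transitions j rest ct' (tl + max 0 (ct' - pvDl jobs j))

theorem foldA_eq (jobs : List (Int × Int)) (transitions : List (List Int)) :
    ∀ (rest pre : List Int) (j ct tl : Int),
      ((PySem.List.enumerate rest ((pre.length : Int) + 1)).foldl (fun (st : Int × Int) p =>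
          let pd := PySem.List.pyGetD jobs p.2 (0, 0)
          let ct1 := if p.1 > 0 then
              st.1 + PySem.List.pyGetD (PySem.List.pyGetD transitions
                (PySem.List.pyGetD (pre ++ j :: rest) (p.1 - 1) 0) []) p.2 0
            else st.1
          let ct2 := ct1 + pd.1
          (ct2, st.2 + calcLateness ct2 pd.2)) (ct, tl)).2
        = pvLoop jobs transitions j rest ct tl := by
  intro rest
  induction rest with
  | nil => intro pre j ct tl; simp [PySem.List.enumerate_nil, pvLoop]
  | cons r rs ih =>
    intro pre j ct tl
    rw [PySem.List.enumerate_cons]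
    have h0 : ((pre.length : Int) + 1 > 0) = True := by simp
    have hget : PySem.List.pyGetD (pre ++ j :: r :: rs) ((pre.length : Int) + 1 - 1) 0 = j := by
      simp
    have hih := ih (pre ++ [j]) r
      (ct + pvTr transitions j r + pvP jobs r)
      (tl + max 0 (ct + pvTr transitions j r + pvP jobs r - pvDl jobs r))
    simp only [List.foldl_cons, h0, if_true, hget, calcLateness, pvLoop]
    simp only [List.append_assoc, List.cons_append, List.nil_append] at hih
    have harith : ((pre ++ [j]).length : Int) + 1 = (pre.length : Int) + 1 + 1 := by simp
    rw [harith] at hih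
    simp only [pvTr, pvP, pvDl] at hih ⊢
    simpa [add_assoc] using hih

-- the seconds of the consecutive pairs of (prev :: rest) are exactly rest
theorem zip_snd_eq (prev : Int) : ∀ (rest : List Int),
    ((prev :: rest).zip rest).map Prod.snd = rest := by
  intro rest
  induction rest generalizing prev with
  | nil => simp
  | cons r rs ih => simpa using ih r

-- B's backward foldr over the pairs, started at any t0 = ct + (sum of the pairs' steps), returns
-- fst = ct and snd = the lateness A's loop accumulates.
theorem backward_eq (jobs : List (Int × Int)) (transitions : List (List Int)) :
    ∀ (rest : List Int) (prev ct tl t0 : Int),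
      t0 = ct + (((prev :: rest).zip rest).map
          (fun q => pvTr transitions q.1 q.2 + pvP jobs q.2)).sum →
      (((prev :: rest).zip rest).foldr (fun q (st : Int × Int) =>
          (st.1 - (pvP jobs q.2 + pvTr transitions q.1 q.2),
           st.2 + max 0 (st.1 - pvDl jobs q.2))) (t0, 0)).1 = ct ∧
      pvLoop jobs transitions prev rest ct tl =
        tl + (((prev :: rest).zip rest).foldr (fun q (st : Int × Int) =>
          (st.1 - (pvP jobs q.2 + pvTr transitions q.1 q.2),
           st.2 + max 0 (st.1 - pvDl jobs q.2))) (t0, 0)).2 := by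
  intro rest
  induction rest with
  | nil => intro prev ct tl t0 ht0; simp at ht0; simp [pvLoop, ht0]
  | cons r rs ih =>
    intro prev ct tl t0 ht0
    simp only [List.zip_cons_cons, List.map_cons, List.sum_cons] at ht0
    have ht0' : t0 = (ct + pvTr transitions prev r + pvP jobs r)
        + (((r :: rs).zip rs).map (fun q => pvTr transitions q.1 q.2 + pvP jobs q.2)).sum := by
      rw [ht0]; ring
    obtain ⟨h1, h2⟩ := ih r (ct + pvTr transitions prev r + pvP jobs r)
      (tl + max 0 (ct + pvTr transitions prev r + pvP jobs r - pvDl jobs r)) t0 ht0'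
    simp only [List.zip_cons_cons, List.foldr_cons]
    refine ⟨?_, ?_⟩
    · rw [h1]; ring
    · simp only [pvLoop]
      rw [h2, h1]
      ring

-- ===== VERDICT (by name: the statement is the Claim_ definition above) =====
theorem getTotalDelay_spec : Claim_equal_getTotalDelay := by
  unfold Claim_equal_getTotalDelay
  intro sequence jobs transitions _ _
  unfold Spec_getTotalDelay
  cases sequence with
  | nil => simp [getTotalDelay, getTotalDelay_alt, PySem.List.enumerate_nil]
  | cons j0 rest =>
    unfold getTotalDelay getTotalDelay_alt
    rw [PySem.List.enumerate_cons]
    simp only [List.foldl_cons]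
    norm_num
    have hA := foldA_eq jobs transitions rest [] j0
      ((PySem.List.pyGetD jobs j0 (0, 0)).1)
      (calcLateness ((PySem.List.pyGetD jobs j0 (0, 0)).1) (PySem.List.pyGetD jobs j0 (0, 0)).2)
    simp only [List.length_nil, Nat.cast_zero, zero_add, List.nil_append] at hA
    rw [hA]
    -- B's t0 equals (p j0) + sum of the pairs' combined steps
    have hsnd : (((j0 :: rest).zip rest).map (fun q => pvP jobs q.2)).sum
        = (rest.map (fun j => pvP jobs j)).sum := by
      conv_rhs => rw [← zip_snd_eq j0 rest, List.map_map]
      rfl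
    have ht0 : pvP jobs j0 + (rest.map (fun j => pvP jobs j)).sum
        + (((j0 :: rest).zip rest).map (fun q => pvTr transitions q.1 q.2)).sum
        = pvP jobs j0 + (((j0 :: rest).zip rest).map
            (fun q => pvTr transitions q.1 q.2 + pvP jobs q.2)).sum := by
      rw [PySem.List.sum_map_add_int, hsnd]; ring
    obtain ⟨h1, h2⟩ := backward_eq jobs transitions rest j0 (pvP jobs j0)
      (calcLateness (pvP jobs j0) (pvDl jobs j0))
      (pvP jobs j0 + (rest.map (fun j => pvP jobs j)).sum
        + (((j0 :: rest).zip rest).map (fun q => pvTr transitions q.1 q.2)).sum) ht0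
    simp only [pvP, pvDl, pvTr] at h1 h2 ⊢
    rw [h2, h1]
    simp [calcLateness]
    ring
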